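-- pv_equiv track=rewrite | github.com/Jklimczewski/optimization-exercises | zad7/main.py | hamilton_cycle
-- ===== SOURCE A (Python) =====
-- def hamilton_cycle(eulerian_circuit):
--     visited = set()
--     visited.add(eulerian_circuit[0][0])
--     hamilton_cycle = [eulerian_circuit[0][0]]
--
--     for edge in eulerian_circuit:
--         if edge[1] not in visited:
--             hamilton_cycle.append(edge[1])
--             visited.add(edge[1])
--
--     hamilton_cycle.append(eulerian_circuit[0][0])
--     return hamilton_cycle
-- ===== SOURCE B (Python) =====
-- def hamilton_cycle(eulerian_circuit):
--     start = eulerian_circuit[0][0]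
--     seconds = [edge[1] for edge in eulerian_circuit]
--     interior = sorted(set(seconds) - {start}, key=seconds.index)
--     return [start] + interior + [start]
-- ===== Notes on version B (the rewrite author's own statement) =====
-- stated objective: alternative
-- what changed: B drops A's single-pass visited-set-with-branch loop and instead computes the interior nodes as the set difference set(seconds) - {start} sorted by first-occurrence index (key=seconds.index), then wraps it between the two start nodes.
-- outside the precondition, e.g. on hamilton_cycle([]): A raises IndexError, B raises IndexError
import Mathlib
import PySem

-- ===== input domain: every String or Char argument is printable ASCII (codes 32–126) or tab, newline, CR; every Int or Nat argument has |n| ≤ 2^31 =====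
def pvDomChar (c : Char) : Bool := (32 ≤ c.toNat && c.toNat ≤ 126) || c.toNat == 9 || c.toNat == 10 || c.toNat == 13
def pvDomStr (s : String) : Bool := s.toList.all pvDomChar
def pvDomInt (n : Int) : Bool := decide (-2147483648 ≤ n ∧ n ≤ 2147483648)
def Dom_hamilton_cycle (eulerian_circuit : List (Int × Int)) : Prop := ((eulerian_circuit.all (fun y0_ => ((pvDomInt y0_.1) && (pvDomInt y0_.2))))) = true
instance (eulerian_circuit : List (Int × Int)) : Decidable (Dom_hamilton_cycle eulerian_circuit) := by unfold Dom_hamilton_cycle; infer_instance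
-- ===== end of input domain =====

-- B replaces A's single-pass visited-set loop by set difference + sort: collect the distinct
-- target nodes except the start as a set, then order them by first-occurrence index
-- (key=seconds.index); alternative algorithm, same return value.

-- ===== PORT A =====
-- visited-set loop: visited starts {ec[0][0]}, append edge[1] when unseen, close the cycle.
def hamilton_cycle (eulerian_circuit : List (Int × Int)) : List Int :=
  match eulerian_circuit with
  | [] => []   -- Python raises IndexError here; excluded by Pre_hamilton_cycle
  | e0 :: _ =>
    let start := e0.1
    let st := eulerian_circuit.foldl
      (fun (st : PySem.Set Int × List Int) edge =>
        if PySem.Set.contains st.1 edge.2 then st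
        else (PySem.Set.add st.1 edge.2, st.2 ++ [edge.2]))
      (PySem.Set.add PySem.Set.empty start, [start])
    st.2 ++ [start]

-- ===== PORT B =====
-- seconds = [e[1] for e in ec]; sorted(set(seconds) - {start}, key=seconds.index);
-- the sort key seconds.index is injective on the set, so Python's result does not depend on
-- set iteration order and sorting the PySem.Set in its first-insertion order is exact.
-- seconds.index(v) never raises here (v ∈ seconds), so index? is always some; .getD 0 is its value.
def hamilton_cycle_alt (eulerian_circuit : List (Int × Int)) : List Int :=
  match eulerian_circuit with
  | [] => []   -- Python raises IndexError here; excluded by Pre_hamilton_cycle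
  | e0 :: _ =>
    let start := e0.1
    let seconds := eulerian_circuit.map (fun edge => edge.2)
    let interior := PySem.List.sorted
      (PySem.Set.diff (PySem.Set.ofList seconds) (PySem.Set.ofList [start]))
      (fun v => (PySem.List.index? seconds v).getD 0) false
    start :: (interior ++ [start])

-- ===== PRECONDITION & SPEC =====
-- Pre_ excludes only the empty list, on which both Pythons raise IndexError at ec[0][0].
def Pre_hamilton_cycle (eulerian_circuit : List (Int × Int)) : Prop := eulerian_circuit ≠ []
instance (eulerian_circuit : List (Int × Int)) : Decidable (Pre_hamilton_cycle eulerian_circuit) := by unfold Pre_hamilton_cycle; infer_instance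
def pvWitness_hamilton_cycle : (List (Int × Int)) := [(1, 2), (2, 3), (3, 1)]

def Spec_hamilton_cycle (eulerian_circuit : List (Int × Int)) (out : List Int) : Prop := out = hamilton_cycle_alt eulerian_circuit
instance (eulerian_circuit : List (Int × Int)) (out : List Int) : Decidable (Spec_hamilton_cycle eulerian_circuit out) := by unfold Spec_hamilton_cycle; infer_instance

-- ===== CLAIM (what is proved, stated in full; the proofs are below) =====
def Claim_equal_hamilton_cycle : Prop := ∀ (eulerian_circuit : List (Int × Int)), Dom_hamilton_cycle eulerian_circuit → Pre_hamilton_cycle eulerian_circuit → Spec_hamilton_cycle eulerian_circuit (hamilton_cycle eulerian_circuit)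

-- ===== LEMMAS AND PROOFS =====

-- A's loop keeps its visited set and its output list equal as lists; from an equal pair
-- (s, s) it computes exactly the fold of Set.add.
theorem loopA_eq (xs : List Int) (s : List Int) :
    xs.foldl
      (fun (st : PySem.Set Int × List Int) x =>
        if PySem.Set.contains st.1 x then st
        else (PySem.Set.add st.1 x, st.2 ++ [x]))
      (s, s)
    = (xs.foldl PySem.Set.add s, xs.foldl PySem.Set.add s) := by
  induction xs generalizing s with
  | nil => rfl
  | cons x xs ih =>
    simp only [List.foldl_cons]
    have hadd : PySem.Set.add s x = if PySem.Set.contains s x then s else s ++ [x] := rfl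
    by_cases h : PySem.Set.contains s x
    · rw [if_pos h, hadd, if_pos h, ih]
    · rw [if_neg h, hadd, if_neg h, ih]

-- Folding Set.add from accumulator s appends exactly the first occurrences not already in s.
theorem foldl_add_eq_append_filter (xs : List Int) (s : List Int) :
    xs.foldl PySem.Set.add s
      = s ++ (PySem.Set.ofList xs).filter (fun y => !decide (y ∈ s)) := by
  induction xs generalizing s with
  | nil => simp [PySem.Set.ofList]
  | cons x xs ih =>
    have hx : PySem.Set.ofList (x :: xs)
        = [x] ++ (PySem.Set.ofList xs).filter (fun y => !decide (y ∈ ([x] : List Int))) := by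
      rw [PySem.Set.ofList_eq_foldl, List.foldl_cons]
      have h0 : PySem.Set.add ([] : List Int) x = [x] := by
        simp [PySem.Set.add, PySem.Set.contains]
      rw [h0]
      exact ih [x]
    rw [List.foldl_cons, ih, hx]
    by_cases h : x ∈ s
    · have hadd : PySem.Set.add s x = s := by simp [PySem.Set.add, PySem.Set.contains, h]
      rw [hadd, List.filter_append, List.filter_filter]
      have h1 : List.filter (fun y => !decide (y ∈ s)) [x] = [] := by simp [h]
      rw [h1, List.nil_append]
      congr 1
      apply List.filter_congr
      intro y _
      by_cases hy : y ∈ s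
      · simp [hy]
      · have hyx : y ≠ x := fun e => hy (e ▸ h)
        simp [hy, hyx]
    · have hadd : PySem.Set.add s x = s ++ [x] := by simp [PySem.Set.add, PySem.Set.contains, h]
      rw [hadd, List.filter_append, List.filter_filter]
      have h1 : List.filter (fun y => !decide (y ∈ s)) [x] = [x] := by simp [h]
      rw [h1, List.append_assoc]
      congr 2
      apply List.filter_congr
      intro y _
      by_cases h1 : y ∈ s <;> by_cases h2 : y = x <;> simp [h1, h2, h]

-- The distinct elements of xs, in first-occurrence order, have strictly increasing
-- first-occurrence indices.
theorem pairwise_index_ofList (xs : List Int) :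
    (PySem.Set.ofList xs).Pairwise
      (fun a b => (PySem.List.index? xs a).getD 0 < (PySem.List.index? xs b).getD 0) := by
  induction xs using List.reverseRecOn with
  | nil => simp [PySem.Set.ofList]
  | append_singleton xs x ih =>
    have hof : PySem.Set.ofList (xs ++ [x]) = PySem.Set.add (PySem.Set.ofList xs) x := by
      simp [PySem.Set.ofList_eq_foldl, List.foldl_append]
    rw [hof]
    have hstep : ∀ a b : Int, a ∈ PySem.Set.ofList xs → b ∈ PySem.Set.ofList xs →
        (PySem.List.index? xs a).getD 0 < (PySem.List.index? xs b).getD 0 →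
        (PySem.List.index? (xs ++ [x]) a).getD 0 < (PySem.List.index? (xs ++ [x]) b).getD 0 := by
      intro a b ha hb hab
      have ha' : a ∈ xs := (PySem.Set.mem_ofList _ _).1 ha
      have hb' : b ∈ xs := (PySem.Set.mem_ofList _ _).1 hb
      rwa [PySem.List.index?_append_of_mem _ ha', PySem.List.index?_append_of_mem _ hb']
    by_cases h : PySem.Set.contains (PySem.Set.ofList xs) x
    · have hx' : x ∈ xs := by simpa [PySem.Set.contains] using h
      have hadd : PySem.Set.add (PySem.Set.ofList xs) x = PySem.Set.ofList xs := by
        simp [PySem.Set.add, PySem.Set.contains, hx']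
      rw [hadd]
      exact ih.imp_of_mem (fun {a b} ha hb hab => hstep a b ha hb hab)
    · have hxmem : x ∉ xs := by
        intro hx
        apply h
        simp [PySem.Set.contains, (PySem.Set.mem_ofList _ _).2 hx]
      have hadd : PySem.Set.add (PySem.Set.ofList xs) x = PySem.Set.ofList xs ++ [x] := by
        simp [PySem.Set.add, PySem.Set.contains, hxmem]
      rw [hadd, List.pairwise_append]
      refine ⟨ih.imp_of_mem (fun {a b} ha hb hab => hstep a b ha hb hab), by simp, ?_⟩
      intro a ha b hb
      have ha' : a ∈ xs := (PySem.Set.mem_ofList _ _).1 ha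
      have hbx : b = x := by simpa using hb
      rw [hbx, PySem.List.index?_append_of_mem _ ha',
          PySem.List.index?_append_singleton_self xs x hxmem]
      have hsome : (PySem.List.index? xs a).isSome := (PySem.List.index?_isSome_iff _ _).2 ha'
      obtain ⟨k, hk⟩ := Option.isSome_iff_exists.1 hsome
      obtain ⟨hklt, -, -⟩ := PySem.List.getElem_of_index?_eq_some hk
      rw [hk]
      simpa using hklt

-- ===== VERDICT (by name: the statement is the Claim_ definition above) =====
theorem hamilton_cycle_spec : Claim_equal_hamilton_cycle := by
  intro ec _ hpre
  unfold Spec_hamilton_cycle hamilton_cycle hamilton_cycle_alt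
  match ec with
  | [] => exact absurd rfl hpre
  | e0 :: rest =>
    simp only
    set seconds := (e0 :: rest).map (fun edge => edge.2) with hsec
    have hinit : (PySem.Set.add PySem.Set.empty e0.1, ([e0.1] : List Int))
        = (([e0.1] : List Int), ([e0.1] : List Int)) := rfl
    -- A's loop over the edges is the same loop over seconds = [e.2 for e in ec]
    have hmap : (e0 :: rest).foldl
        (fun (st : PySem.Set Int × List Int) edge =>
          if PySem.Set.contains st.1 edge.2 then st
          else (PySem.Set.add st.1 edge.2, st.2 ++ [edge.2]))
        (([e0.1] : List Int), ([e0.1] : List Int))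
      = seconds.foldl
        (fun (st : PySem.Set Int × List Int) x =>
          if PySem.Set.contains st.1 x then st
          else (PySem.Set.add st.1 x, st.2 ++ [x]))
        (([e0.1] : List Int), ([e0.1] : List Int)) := by
      rw [hsec, List.foldl_map]
    rw [hinit, hmap, loopA_eq, foldl_add_eq_append_filter]
    -- B's sorted set-difference is that same filtered dedup list
    have hof1 : PySem.Set.ofList [e0.1] = [e0.1] := by
      simp [PySem.Set.ofList, PySem.Set.add, PySem.Set.contains, PySem.Set.empty]
    have hD : PySem.Set.diff (PySem.Set.ofList seconds) (PySem.Set.ofList [e0.1])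
        = (PySem.Set.ofList seconds).filter (fun y => !decide (y ∈ ([e0.1] : List Int))) := by
      rw [hof1]
      simp [PySem.Set.diff, PySem.Set.contains]
    have hsorted : PySem.List.sorted
        (PySem.Set.diff (PySem.Set.ofList seconds) (PySem.Set.ofList [e0.1]))
        (fun v => (PySem.List.index? seconds v).getD 0) false
        = (PySem.Set.ofList seconds).filter (fun y => !decide (y ∈ ([e0.1] : List Int))) := by
      rw [hD]
      exact PySem.List.sorted_eq_of_perm_of_pairwise_lt _ _ _ (List.Perm.refl _)
        ((pairwise_index_ofList seconds).filter _)
    rw [hsorted]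
    simp
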